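-- pv_equiv track=rewrite | github.com/FRI-Energy-Analytics/extra_credit | Jerry/queens_attack.py | branch
-- ===== SOURCE A (Python) =====
-- def branch(dR, dC, n, r_q, c_q, obstacles):
--     res = 0
--
--     curr_row = r_q + dR
--     curr_col = c_q + dC
--
--     while 1 <= curr_row <= n and 1 <= curr_col <= n and (curr_row, curr_col) not in obstacles:
--         curr_row += dR
--         curr_col += dC
--         res += 1
--
--     return res
-- ===== SOURCE B (Python) =====
-- def branch(dR, dC, n, r_q, c_q, obstacles):
--     if dR == 0 and dC == 0:
--         return 0
--
--     def cap(d, q):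
--         # max number of steps along d starting from q staying in [1, n]; None = unbounded
--         if d > 0:
--             return 0 if q + d < 1 else max(0, (n - q) // d)
--         if d < 0:
--             return 0 if q + d > n else max(0, (q - 1) // (-d))
--         return None if 1 <= q <= n else 0
--
--     def ray_k(orr, occ):
--         # the step index k >= ? at which the obstacle sits on the ray, or None
--         if dR != 0:
--             t = orr - r_q
--             if t % dR != 0:
--                 return None
--             k = t // dR
--             return k if occ == c_q + k * dC else None
--         if orr != r_q:
--             return None
--         t = occ - c_q
--         return t // dC if t % dC == 0 else None
--
--     rc = cap(dR, r_q)
--     cc = cap(dC, c_q)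
--     if rc is None:
--         best = cc
--     elif cc is None:
--         best = rc
--     else:
--         best = min(rc, cc)
--
--     for (orr, occ) in obstacles:
--         k = ray_k(orr, occ)
--         if k is not None and k >= 1 and k - 1 < best:
--             best = k - 1
--     return best
-- ===== Notes on version B (the rewrite author's own statement) =====
-- stated objective: alternative
-- what changed: Replaces the square-by-square walk with closed-form integer arithmetic: the step distance to the board edge along (dR,dC), plus one division per obstacle to test whether it lies on the ray and at which step, returning min(edge, min obstacle step - 1); it also excludes A's infinite loop at dR=dC=0.
import Mathlib
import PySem

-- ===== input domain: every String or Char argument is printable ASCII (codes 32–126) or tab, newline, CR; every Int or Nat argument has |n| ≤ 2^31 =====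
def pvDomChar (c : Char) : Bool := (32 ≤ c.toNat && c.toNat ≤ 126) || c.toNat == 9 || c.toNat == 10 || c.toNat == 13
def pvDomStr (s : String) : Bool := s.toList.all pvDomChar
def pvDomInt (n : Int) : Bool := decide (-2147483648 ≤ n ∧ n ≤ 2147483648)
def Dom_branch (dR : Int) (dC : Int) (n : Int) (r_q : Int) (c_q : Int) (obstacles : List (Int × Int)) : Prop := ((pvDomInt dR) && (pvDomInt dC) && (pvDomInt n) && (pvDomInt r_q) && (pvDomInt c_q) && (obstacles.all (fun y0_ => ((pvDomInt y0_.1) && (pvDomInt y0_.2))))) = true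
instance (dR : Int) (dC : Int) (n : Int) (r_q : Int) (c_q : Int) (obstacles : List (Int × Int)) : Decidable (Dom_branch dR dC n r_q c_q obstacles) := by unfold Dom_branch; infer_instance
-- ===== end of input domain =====

-- B replaces A's square-by-square walk by closed-form edge distance plus one division per
-- obstacle (objective: alternative — a different algorithm; no speed difference was measured).


-- ===== PORT A =====
-- A's while loop as a fuel recursion; the fuel is only a totaliser: on every input admitted by
-- Pre_branch it is never exhausted (isCount_lt_fuel below), so the port computes A's loop exactly.
def branchLoop (dR : Int) (dC : Int) (n : Int) (obstacles : List (Int × Int)) :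
    Nat → Int → Int → Int → Int
  | 0, _, _, res => res
  | f + 1, r, c, res =>
    if 1 ≤ r ∧ r ≤ n ∧ 1 ≤ c ∧ c ≤ n ∧ (r, c) ∉ obstacles then
      branchLoop dR dC n obstacles f (r + dR) (c + dC) (res + 1)
    else res

def branch (dR : Int) (dC : Int) (n : Int) (r_q : Int) (c_q : Int) (obstacles : List (Int × Int)) : Int :=
  branchLoop dR dC n obstacles (n.natAbs + r_q.natAbs + c_q.natAbs + 2) (r_q + dR) (c_q + dC) 0

-- ===== PORT B =====
-- cap(d, q) of Source B: max steps along d keeping q + k*d inside [1, n]; none = unbounded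
def capB (n : Int) (d : Int) (q : Int) : Option Int :=
  if 0 < d then (if q + d < 1 then some 0 else some (max 0 (PySem.Int.floordiv (n - q) d)))
  else if d < 0 then (if n < q + d then some 0 else some (max 0 (PySem.Int.floordiv (q - 1) (-d))))
  else if 1 ≤ q ∧ q ≤ n then none else some 0

-- ray_k of Source B: the step index at which the obstacle sits on the ray, or none
def rayK (dR : Int) (dC : Int) (r_q : Int) (c_q : Int) (o : Int × Int) : Option Int :=
  if dR ≠ 0 then
    if PySem.Int.mod (o.1 - r_q) dR ≠ 0 then none
    else if o.2 = c_q + PySem.Int.floordiv (o.1 - r_q) dR * dC then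
      some (PySem.Int.floordiv (o.1 - r_q) dR)
    else none
  else if o.1 ≠ r_q then none
  else if PySem.Int.mod (o.2 - c_q) dC = 0 then some (PySem.Int.floordiv (o.2 - c_q) dC)
  else none

-- the for-loop of Source B over the obstacles
def obsFold (dR : Int) (dC : Int) (r_q : Int) (c_q : Int) : List (Int × Int) → Int → Int
  | [], best => best
  | o :: rest, best =>
    obsFold dR dC r_q c_q rest
      (match rayK dR dC r_q c_q o with
       | some k => if 1 ≤ k ∧ k - 1 < best then k - 1 else best
       | none => best)

def branch_alt (dR : Int) (dC : Int) (n : Int) (r_q : Int) (c_q : Int) (obstacles : List (Int × Int)) : Int :=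
  if dR = 0 ∧ dC = 0 then 0
  else
    let best :=
      match capB n dR r_q, capB n dC c_q with
      | none, none => 0
      | none, some v => v
      | some v, none => v
      | some a, some b => min a b
    obsFold dR dC r_q c_q obstacles best

-- ===== PRECONDITION & SPEC =====
-- Pre_ excludes exactly the inputs on which A never returns: with dR = dC = 0 and the queen's
-- own square on the board and not an obstacle, A's while loop runs forever.
def Pre_branch (dR : Int) (dC : Int) (n : Int) (r_q : Int) (c_q : Int) (obstacles : List (Int × Int)) : Prop :=
  ¬ (dR = 0 ∧ dC = 0 ∧ 1 ≤ r_q ∧ r_q ≤ n ∧ 1 ≤ c_q ∧ c_q ≤ n ∧ (r_q, c_q) ∉ obstacles)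
instance (dR : Int) (dC : Int) (n : Int) (r_q : Int) (c_q : Int) (obstacles : List (Int × Int)) : Decidable (Pre_branch dR dC n r_q c_q obstacles) := by unfold Pre_branch; infer_instance

def pvWitness_branch : Int × Int × Int × Int × Int × (List (Int × Int)) := (1, 1, 8, 4, 4, [(6, 6)])

def Spec_branch (dR : Int) (dC : Int) (n : Int) (r_q : Int) (c_q : Int) (obstacles : List (Int × Int)) (out : Int) : Prop := out = branch_alt dR dC n r_q c_q obstacles
instance (dR : Int) (dC : Int) (n : Int) (r_q : Int) (c_q : Int) (obstacles : List (Int × Int)) (out : Int) : Decidable (Spec_branch dR dC n r_q c_q obstacles out) := by unfold Spec_branch; infer_instance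

-- ===== CLAIM (what is proved, stated in full; the proofs are below) =====
def Claim_equal_branch : Prop := ∀ (dR : Int) (dC : Int) (n : Int) (r_q : Int) (c_q : Int) (obstacles : List (Int × Int)), Dom_branch dR dC n r_q c_q obstacles → Pre_branch dR dC n r_q c_q obstacles → Spec_branch dR dC n r_q c_q obstacles (branch dR dC n r_q c_q obstacles)

-- ===== LEMMAS AND PROOFS =====

-- the k-th square of the ray is on the board and unobstructed
def sqOK (dR : Int) (dC : Int) (n : Int) (r_q : Int) (c_q : Int) (obstacles : List (Int × Int)) (k : Int) : Prop :=
  1 ≤ r_q + k * dR ∧ r_q + k * dR ≤ n ∧ 1 ≤ c_q + k * dC ∧ c_q + k * dC ≤ n ∧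
    (r_q + k * dR, c_q + k * dC) ∉ obstacles

-- m is the number of leading good squares of the ray — the value A's loop computes
def IsCount (dR : Int) (dC : Int) (n : Int) (r_q : Int) (c_q : Int) (obstacles : List (Int × Int)) (m : Int) : Prop :=
  0 ≤ m ∧ (∀ k : Int, 1 ≤ k → k ≤ m → sqOK dR dC n r_q c_q obstacles k) ∧
    ¬ sqOK dR dC n r_q c_q obstacles (m + 1)

-- A's loop returns the (unique) leading-good-square count
theorem loopA_eq {dR dC n r_q c_q : Int} {obstacles : List (Int × Int)} {m : Int}
    (hm : IsCount dR dC n r_q c_q obstacles m) :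
    ∀ (f : Nat) (j : Int), 0 ≤ j → j ≤ m → m - j < (f : Int) →
      branchLoop dR dC n obstacles f (r_q + (j + 1) * dR) (c_q + (j + 1) * dC) j = m := by
  obtain ⟨hm0, hall, hno⟩ := hm
  intro f
  induction f with
  | zero => intro j h0 hj hf; exfalso; simp at hf; omega
  | succ f ih =>
    intro j h0 hj hf
    simp only [branchLoop]
    by_cases hcase : j = m
    · subst hcase
      rw [if_neg]
      intro hc
      exact hno ⟨hc.1, hc.2.1, hc.2.2.1, hc.2.2.2.1, hc.2.2.2.2⟩
    · have hjm : j < m := lt_of_le_of_ne hj hcase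
      have hok := hall (j + 1) (by omega) (by omega)
      rw [if_pos ⟨hok.1, hok.2.1, hok.2.2.1, hok.2.2.2.1, hok.2.2.2.2⟩]
      have e1 : r_q + (j + 1) * dR + dR = r_q + (j + 1 + 1) * dR := by ring
      have e2 : c_q + (j + 1) * dC + dC = c_q + (j + 1 + 1) * dC := by ring
      rw [e1, e2]
      exact ih (j + 1) (by omega) (by omega) (by push_cast; push_cast at hf; omega)

-- the count fits under A's fuel
theorem isCount_lt_fuel {dR dC n r_q c_q : Int} {obstacles : List (Int × Int)} {m : Int}
    (hpre : Pre_branch dR dC n r_q c_q obstacles)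
    (hm : IsCount dR dC n r_q c_q obstacles m) :
    m < ((n.natAbs + r_q.natAbs + c_q.natAbs + 2 : Nat) : Int) := by
  obtain ⟨hm0, hall, hno⟩ := hm
  by_cases hm1 : m ≤ 0
  · omega
  · have hok := hall m (by omega) le_rfl
    obtain ⟨hr1, hr2, hc1, hc2, -⟩ := hok
    rcases lt_trichotomy dR 0 with hdR | hdR | hdR
    · have h1 : m ≤ m * (-dR) := le_mul_of_one_le_right (by omega) (by omega)
      have he : m * (-dR) = -(m * dR) := by ring
      have hmn : m ≤ r_q - 1 := by linarith
      omega
    · rcases lt_trichotomy dC 0 with hdC | hdC | hdC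
      · have h1 : m ≤ m * (-dC) := le_mul_of_one_le_right (by omega) (by omega)
        have he : m * (-dC) = -(m * dC) := by ring
        have hmn : m ≤ c_q - 1 := by linarith
        omega
      · exfalso
        rw [hdR] at hr1 hr2
        rw [hdC] at hc1 hc2
        have hmem := (hall m (by omega) le_rfl).2.2.2.2
        rw [hdR, hdC] at hmem
        simp only [mul_zero, add_zero] at hr1 hr2 hc1 hc2 hmem
        exact hpre ⟨hdR, hdC, hr1, hr2, hc1, hc2, hmem⟩
      · have h1 : m ≤ m * dC := le_mul_of_one_le_right (by omega) (by omega)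
        have hmn : m ≤ n - c_q := by linarith
        omega
    · have h1 : m ≤ m * dR := le_mul_of_one_le_right (by omega) (by omega)
      have hmn : m ≤ n - r_q := by linarith
      omega

theorem branch_eq_of_isCount {dR dC n r_q c_q : Int} {obstacles : List (Int × Int)} {m : Int}
    (hpre : Pre_branch dR dC n r_q c_q obstacles)
    (hm : IsCount dR dC n r_q c_q obstacles m) :
    branch dR dC n r_q c_q obstacles = m := by
  have h1 : r_q + dR = r_q + (0 + 1) * dR := by ring
  have h2 : c_q + dC = c_q + (0 + 1) * dC := by ring
  unfold branch
  rw [h1, h2]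
  exact loopA_eq hm _ 0 le_rfl hm.1 (by have := isCount_lt_fuel hpre hm; omega)

-- characterisation of B's cap
theorem cap_none {n d q : Int} (h : capB n d q = none) : d = 0 ∧ 1 ≤ q ∧ q ≤ n := by
  unfold capB at h
  split_ifs at h with h1 h2 h3 h4 h5 <;> simp_all
  omega

theorem cap_some {n d q v : Int} (h : capB n d q = some v) :
    0 ≤ v ∧ (∀ k : Int, 1 ≤ k → k ≤ v → 1 ≤ q + k * d ∧ q + k * d ≤ n) ∧
      ¬ (1 ≤ q + (v + 1) * d ∧ q + (v + 1) * d ≤ n) := by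
  unfold capB at h
  split_ifs at h with h1 h2 h3 h4 h5 <;> simp only [Option.some.injEq] at h
  · -- 0 < d, q + d < 1 : v = 0
    subst h
    refine ⟨le_rfl, by omega, fun hc => ?_⟩
    have he : (0 + 1) * d = d := by ring
    rw [he] at hc; omega
  · -- 0 < d : v = max 0 (floordiv (n-q) d)
    subst h
    refine ⟨le_max_left _ _, fun k hk1 hk2 => ?_, fun hc => ?_⟩
    · have hkf : k ≤ PySem.Int.floordiv (n - q) d := by
        rcases le_max_iff.mp hk2 with h' | h' <;> omega
      have hup : k * d ≤ n - q := (PySem.Int.le_floordiv_iff_mul_le h1).mp hkf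
      have hlo : d ≤ k * d := le_mul_of_one_le_left (le_of_lt h1) hk1
      constructor <;> linarith
    · have hfv : PySem.Int.floordiv (n - q) d < max 0 (PySem.Int.floordiv (n - q) d) + 1 := by
        have := le_max_right (0:Int) (PySem.Int.floordiv (n - q) d); omega
      have := (PySem.Int.floordiv_lt_iff_lt_mul h1).mp hfv
      linarith [hc.2]
  · -- d < 0, n < q + d : v = 0
    subst h
    refine ⟨le_rfl, by omega, fun hc => ?_⟩
    have he : (0 + 1) * d = d := by ring
    rw [he] at hc; omega
  · -- d < 0 : v = max 0 (floordiv (q-1) (-d))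
    subst h
    have hd : (0:Int) < -d := by omega
    refine ⟨le_max_left _ _, fun k hk1 hk2 => ?_, fun hc => ?_⟩
    · have hkf : k ≤ PySem.Int.floordiv (q - 1) (-d) := by
        rcases le_max_iff.mp hk2 with h' | h' <;> omega
      have hup : k * (-d) ≤ q - 1 := (PySem.Int.le_floordiv_iff_mul_le hd).mp hkf
      have he : k * (-d) = -(k * d) := by ring
      have hlo : k * d ≤ 1 * d := mul_le_mul_of_nonpos_right hk1 (by omega)
      constructor <;> linarith
    · have hfv : PySem.Int.floordiv (q - 1) (-d) < max 0 (PySem.Int.floordiv (q - 1) (-d)) + 1 := by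
        have := le_max_right (0:Int) (PySem.Int.floordiv (q - 1) (-d)); omega
      have h2' := (PySem.Int.floordiv_lt_iff_lt_mul hd).mp hfv
      have he : (max 0 (PySem.Int.floordiv (q - 1) (-d)) + 1) * (-d)
          = -((max 0 (PySem.Int.floordiv (q - 1) (-d)) + 1) * d) := by ring
      rw [he] at h2'
      linarith [hc.1]
  · -- d = 0, q outside [1, n] : v = 0
    subst h
    have hd : d = 0 := by omega
    subst hd
    refine ⟨le_rfl, by omega, fun hc => ?_⟩
    exact h5 ⟨by linarith [hc.1], by linarith [hc.2]⟩

-- characterisation of B's ray_k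
theorem floordiv_of_dvd_eq {t d : Int} (hd : d ≠ 0) (h : PySem.Int.mod t d = 0) :
    PySem.Int.floordiv t d * d = t := by
  have := PySem.Int.floordiv_mul_add_mod t d
  omega

theorem rayK_sound {dR dC r_q c_q : Int} {o : Int × Int} {k : Int}
    (hne : ¬ (dR = 0 ∧ dC = 0)) (h : rayK dR dC r_q c_q o = some k) :
    o.1 = r_q + k * dR ∧ o.2 = c_q + k * dC := by
  unfold rayK at h
  split_ifs at h with h1 h2 h3 h4 h5
  · -- dR ≠ 0, mod = 0, col matches: k = floordiv (o.1 - r_q) dR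
    simp only [Option.some.injEq] at h
    subst h
    have hm : PySem.Int.mod (o.1 - r_q) dR = 0 := by omega
    have := floordiv_of_dvd_eq h1 hm
    exact ⟨by omega, h3⟩
  · -- dR = 0, o.1 = r_q, mod = 0
    simp only [Option.some.injEq] at h
    subst h
    have h1' : dR = 0 := by omega
    have hC : dC ≠ 0 := fun hc => hne ⟨h1', hc⟩
    have := floordiv_of_dvd_eq hC h5
    constructor
    · rw [h1']; omega
    · omega

theorem rayK_complete {dR dC r_q c_q : Int} (k : Int)
    (hne : ¬ (dR = 0 ∧ dC = 0)) :
    rayK dR dC r_q c_q (r_q + k * dR, c_q + k * dC) = some k := by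
  unfold rayK
  by_cases h1 : dR = 0
  · have hC : dC ≠ 0 := fun hc => hne ⟨h1, hc⟩
    have hm : PySem.Int.mod (k * dC) dC = 0 := by
      rw [PySem.Int.mod_eq_zero_iff_dvd]; exact ⟨k, by ring⟩
    have hf : PySem.Int.floordiv (k * dC) dC = k := by
      have h2 := floordiv_of_dvd_eq hC hm
      exact mul_right_cancel₀ hC h2
    simp [h1, hm, hf]
  · have hm : PySem.Int.mod (k * dR) dR = 0 := by
      rw [PySem.Int.mod_eq_zero_iff_dvd]; exact ⟨k, by ring⟩
    have hf : PySem.Int.floordiv (k * dR) dR = k := by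
      have h2 := floordiv_of_dvd_eq h1 hm
      exact mul_right_cancel₀ h1 h2
    simp [h1, hm, hf]

-- characterisation of B's obstacle loop
theorem obsFold_spec (dR dC r_q c_q : Int) :
    ∀ (l : List (Int × Int)) (init : Int),
      obsFold dR dC r_q c_q l init ≤ init ∧
      (obsFold dR dC r_q c_q l init = init ∨
        ∃ o ∈ l, ∃ k : Int, rayK dR dC r_q c_q o = some k ∧ 1 ≤ k ∧
          obsFold dR dC r_q c_q l init = k - 1) ∧
      (∀ o ∈ l, ∀ k : Int, rayK dR dC r_q c_q o = some k → 1 ≤ k →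
        obsFold dR dC r_q c_q l init ≤ k - 1) := by
  intro l
  induction l with
  | nil => intro init; refine ⟨le_rfl, Or.inl rfl, by simp⟩
  | cons o rest ih =>
    intro init
    simp only [obsFold]
    rcases hra : rayK dR dC r_q c_q o with _ | k
    · obtain ⟨h1, h2, h3⟩ := ih init
      refine ⟨h1, ?_, ?_⟩
      · rcases h2 with h | ⟨o', ho', k', hk', hk1', he'⟩
        · exact Or.inl h
        · exact Or.inr ⟨o', List.mem_cons_of_mem _ ho', k', hk', hk1', he'⟩
      · intro o' ho' k' hk' hk1'
        rcases List.mem_cons.mp ho' with h | h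
        · subst h; rw [hra] at hk'; cases hk'
        · exact h3 o' h k' hk' hk1'
    · dsimp only
      by_cases hcond : 1 ≤ k ∧ k - 1 < init
      · rw [if_pos hcond]
        obtain ⟨h1, h2, h3⟩ := ih (k - 1)
        refine ⟨by omega, ?_, ?_⟩
        · rcases h2 with h | ⟨o', ho', k', hk', hk1', he'⟩
          · exact Or.inr ⟨o, List.mem_cons_self, k, hra, hcond.1, h⟩
          · exact Or.inr ⟨o', List.mem_cons_of_mem _ ho', k', hk', hk1', he'⟩
        · intro o' ho' k' hk' hk1'
          rcases List.mem_cons.mp ho' with h | h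
          · subst h; rw [hra] at hk'
            injection hk' with hkk; omega
          · exact h3 o' h k' hk' hk1'
      · rw [if_neg hcond]
        obtain ⟨h1, h2, h3⟩ := ih init
        refine ⟨h1, ?_, ?_⟩
        · rcases h2 with h | ⟨o', ho', k', hk', hk1', he'⟩
          · exact Or.inl h
          · exact Or.inr ⟨o', List.mem_cons_of_mem _ ho', k', hk', hk1', he'⟩
        · intro o' ho' k' hk' hk1'
          rcases List.mem_cons.mp ho' with h | h
          · subst h; rw [hra] at hk'
            injection hk' with hkk; omega
          · exact h3 o' h k' hk' hk1'

-- B's obstacle loop started at a correct edge bound computes the leading-good-square count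
theorem isCount_fold {dR dC n r_q c_q : Int} {obstacles : List (Int × Int)} {e : Int}
    (hne : ¬ (dR = 0 ∧ dC = 0)) (he0 : 0 ≤ e)
    (heall : ∀ k : Int, 1 ≤ k → k ≤ e →
      1 ≤ r_q + k * dR ∧ r_q + k * dR ≤ n ∧ 1 ≤ c_q + k * dC ∧ c_q + k * dC ≤ n)
    (heno : ¬ (1 ≤ r_q + (e + 1) * dR ∧ r_q + (e + 1) * dR ≤ n ∧
      1 ≤ c_q + (e + 1) * dC ∧ c_q + (e + 1) * dC ≤ n)) :
    IsCount dR dC n r_q c_q obstacles (obsFold dR dC r_q c_q obstacles e) := by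
  obtain ⟨hle, hdis, hbnd⟩ := obsFold_spec dR dC r_q c_q obstacles e
  refine ⟨?_, ?_, ?_⟩
  · rcases hdis with h | ⟨o, ho, k, hk, hk1, he'⟩ <;> omega
  · intro k h1 hk
    have hke : k ≤ e := le_trans hk hle
    have h4 := heall k h1 hke
    refine ⟨h4.1, h4.2.1, h4.2.2.1, h4.2.2.2, ?_⟩
    intro hmem
    have hcomp := rayK_complete (dR := dR) (dC := dC) (r_q := r_q) (c_q := c_q) k hne
    have := hbnd _ hmem k hcomp h1
    omega
  · rcases hdis with heq | ⟨o, ho, k, hk, hk1, he'⟩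
    · rw [heq]
      intro hc
      exact heno ⟨hc.1, hc.2.1, hc.2.2.1, hc.2.2.2.1⟩
    · intro hc
      apply hc.2.2.2.2
      obtain ⟨hs1, hs2⟩ := rayK_sound hne hk
      rw [show obsFold dR dC r_q c_q obstacles e + 1 = k from by omega, ← hs1, ← hs2]
      exact ho

-- B returns the leading-good-square count
theorem isCount_alt {dR dC n r_q c_q : Int} {obstacles : List (Int × Int)}
    (hpre : Pre_branch dR dC n r_q c_q obstacles) :
    IsCount dR dC n r_q c_q obstacles (branch_alt dR dC n r_q c_q obstacles) := by
  unfold branch_alt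
  by_cases h00 : dR = 0 ∧ dC = 0
  · rw [if_pos h00]
    refine ⟨le_rfl, fun k hk1 hk0 => absurd hk0 (by omega), ?_⟩
    intro hc
    obtain ⟨hdR, hdC⟩ := h00
    obtain ⟨a1, a2, a3, a4, a5⟩ := hc
    rw [hdR] at a1 a2 a5
    rw [hdC] at a3 a4 a5
    simp only [mul_zero, add_zero] at a1 a2 a3 a4 a5
    exact hpre ⟨hdR, hdC, a1, a2, a3, a4, a5⟩
  · rw [if_neg h00]
    rcases hr : capB n dR r_q with _ | a <;> rcases hc : capB n dC c_q with _ | b <;>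
      dsimp only
    · -- none, none: impossible
      exact absurd ⟨(cap_none hr).1, (cap_none hc).1⟩ h00
    · -- rows unbounded, cols capped at b
      obtain ⟨hd0, hq1, hq2⟩ := cap_none hr
      obtain ⟨hB0, hBall, hBno⟩ := cap_some hc
      refine isCount_fold h00 hB0 (fun k hk1 hk => ?_) (fun h4 => hBno ⟨h4.2.2.1, h4.2.2.2⟩)
      have := hBall k hk1 hk
      exact ⟨by simp only [hd0, mul_zero, add_zero]; exact hq1,
             by simp only [hd0, mul_zero, add_zero]; exact hq2, this.1, this.2⟩
    · -- rows capped at a, cols unbounded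
      obtain ⟨hd0, hq1, hq2⟩ := cap_none hc
      obtain ⟨hA0, hAall, hAno⟩ := cap_some hr
      refine isCount_fold h00 hA0 (fun k hk1 hk => ?_) (fun h4 => hAno ⟨h4.1, h4.2.1⟩)
      have := hAall k hk1 hk
      exact ⟨this.1, this.2,
             by simp only [hd0, mul_zero, add_zero]; exact hq1,
             by simp only [hd0, mul_zero, add_zero]; exact hq2⟩
    · -- both capped: min a b
      obtain ⟨hA0, hAall, hAno⟩ := cap_some hr
      obtain ⟨hB0, hBall, hBno⟩ := cap_some hc
      refine isCount_fold h00 (le_min hA0 hB0) (fun k hk1 hk => ?_) ?_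
      · have hA := hAall k hk1 (le_trans hk (min_le_left _ _))
        have hB := hBall k hk1 (le_trans hk (min_le_right _ _))
        exact ⟨hA.1, hA.2, hB.1, hB.2⟩
      · rcases le_total a b with hab | hab
        · rw [min_eq_left hab]
          exact fun h4 => hAno ⟨h4.1, h4.2.1⟩
        · rw [min_eq_right hab]
          exact fun h4 => hBno ⟨h4.2.2.1, h4.2.2.2⟩

-- ===== VERDICT (by name: the statement is the Claim_ definition above) =====
theorem branch_spec : Claim_equal_branch := by
  intro dR dC n r_q c_q obstacles _ hpre
  unfold Spec_branch
  exact branch_eq_of_isCount hpre (isCount_alt hpre)
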